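-- pv_equiv track=rewrite | github.com/MolfarUA/CodeWars_Solutions | 6 kyu/Survivors Ep.4/solution.py | survive
-- ===== SOURCE A (Python) =====
-- def survive(momentum, powerups):
--     j = 0
--     while momentum > 0 and j <len(powerups):
--         momentum -= 1
--         momentum += powerups[j]
--         j += 1
--     if momentum>0:
--         return True
--     return False
-- ===== SOURCE B (Python) =====
-- def survive(momentum, powerups):
--     prefixes = [momentum]
--     for p in powerups:
--         prefixes.append(prefixes[-1] + p - 1)
--     return min(prefixes) > 0
-- ===== Notes on version B (the rewrite author's own statement) =====
-- stated objective: alternative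
-- what changed: Replaces the early-exit while loop over indices with building the full list of prefix momenta (seeded with the initial momentum) and testing whether the global minimum is positive.
import Mathlib
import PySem

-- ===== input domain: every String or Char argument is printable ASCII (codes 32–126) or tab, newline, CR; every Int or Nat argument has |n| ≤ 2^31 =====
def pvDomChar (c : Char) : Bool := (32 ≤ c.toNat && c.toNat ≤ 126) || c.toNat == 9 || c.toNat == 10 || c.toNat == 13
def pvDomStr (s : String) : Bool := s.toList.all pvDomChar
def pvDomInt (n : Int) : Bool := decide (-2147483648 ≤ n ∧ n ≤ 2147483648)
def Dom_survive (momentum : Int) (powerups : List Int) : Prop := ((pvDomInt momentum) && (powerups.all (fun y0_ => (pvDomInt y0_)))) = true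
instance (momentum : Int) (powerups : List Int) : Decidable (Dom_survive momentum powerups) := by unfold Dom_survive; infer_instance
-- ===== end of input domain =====

-- B replaces A's early-exit while loop with building the full list of prefix momenta and testing min > 0 (alternative decomposition, same cost).


-- ===== PORT A =====
-- while momentum > 0 and j < len(powerups): momentum -= 1; momentum += powerups[j]; j += 1
def surviveLoop (m : Int) (ps : List Int) : Int :=
  match ps with
  | [] => m
  | p :: rest => if m > 0 then surviveLoop (m - 1 + p) rest else m

def survive (momentum : Int) (powerups : List Int) : Bool :=
  decide (surviveLoop momentum powerups > 0)

-- ===== PORT B =====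
-- prefixes = [momentum]; for p in powerups: prefixes.append(prefixes[-1] + p - 1); return min(prefixes) > 0
def survive_alt (momentum : Int) (powerups : List Int) : Bool :=
  let prefixes := powerups.foldl (fun acc p => acc ++ [acc.getLast! + p - 1]) [momentum]
  match PySem.List.min? prefixes (fun x => x) with
  | some v => decide (v > 0)
  | none => false

-- ===== PRECONDITION & SPEC =====
def Spec_survive (momentum : Int) (powerups : List Int) (out : Bool) : Prop := out = survive_alt momentum powerups
instance (momentum : Int) (powerups : List Int) (out : Bool) : Decidable (Spec_survive momentum powerups out) := by unfold Spec_survive; infer_instance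

-- ===== CLAIM (what is proved, stated in full; the proofs are below) =====
def Claim_equal_survive : Prop := ∀ (momentum : Int) (powerups : List Int), Dom_survive momentum powerups → Spec_survive momentum powerups (survive momentum powerups)

-- ===== LEMMAS AND PROOFS =====

/-- The list of prefix momenta A walks through (seed included). -/
def pvScan (m : Int) : List Int → List Int
  | [] => [m]
  | p :: rest => m :: pvScan (m - 1 + p) rest

lemma pvScan_ne_nil (m : Int) (ps : List Int) : pvScan m ps ≠ [] := by
  cases ps <;> simp [pvScan]

lemma fold_eq_scan (ps : List Int) : ∀ (acc : List Int) (m : Int),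
    ps.foldl (fun acc p => acc ++ [acc.getLast! + p - 1]) (acc ++ [m]) = acc ++ pvScan m ps := by
  induction ps with
  | nil => intro acc m; simp [pvScan]
  | cons p rest ih =>
    intro acc m
    have hlast : (acc ++ [m]).getLast! = m := by
      simp
    simp only [List.foldl, hlast, pvScan]
    have : (acc ++ [m]) ++ [m + p - 1] = (acc ++ [m]) ++ [m - 1 + p] := by ring_nf
    rw [this, ih (acc ++ [m]) (m - 1 + p), List.append_assoc]
    rfl

lemma loop_pos_iff (ps : List Int) : ∀ m : Int,
    surviveLoop m ps > 0 ↔ ∀ x ∈ pvScan m ps, x > 0 := by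
  induction ps with
  | nil => intro m; simp [surviveLoop, pvScan]
  | cons p rest ih =>
    intro m
    by_cases hm : m > 0
    · simp [surviveLoop, pvScan, hm, ih (m - 1 + p)]
    · simp [surviveLoop, pvScan, hm]

theorem survive_spec_aux (momentum : Int) (powerups : List Int) :
    survive momentum powerups = survive_alt momentum powerups := by
  unfold survive survive_alt
  have hfold : powerups.foldl (fun acc p => acc ++ [acc.getLast! + p - 1]) [momentum]
      = pvScan momentum powerups := by
    have := fold_eq_scan powerups [] momentum
    simpa using this
  rw [hfold]
  rcases hmin : PySem.List.min? (pvScan momentum powerups) (fun x => x) with _ | v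
  · exact absurd ((PySem.List.min?_eq_none_iff _ _).mp hmin) (pvScan_ne_nil momentum powerups)
  · have hmem : v ∈ pvScan momentum powerups := PySem.List.min?_mem hmin
    have hlow : ∀ y ∈ pvScan momentum powerups, v ≤ y := by
      intro y hy; exact PySem.List.min?_isMin hmin y hy
    simp only [hmin]
    simp only [loop_pos_iff, decide_eq_decide]
    constructor
    · intro h; exact h v hmem
    · intro hv x hx; exact lt_of_lt_of_le hv (hlow x hx)

-- ===== VERDICT (by name: the statement is the Claim_ definition above) =====
theorem survive_spec : Claim_equal_survive := by
  intro momentum powerups _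
  unfold Spec_survive
  exact survive_spec_aux momentum powerups
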